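-- pv_equiv track=rewrite | github.com/KevinChen1994/leetcode-algorithm | offer/13.py | movingCount_2
-- ===== SOURCE A (Python) =====
-- def movingCount_2(m, n, k):
--     queue, visited = [(0, 0, 0, 0)], set()
--     while queue:
--         i, j, si, sj = queue.pop(0)
--         if i >= m or j >= n or k < si + sj or (i, j) in visited:
--             continue
--         visited.add((i, j))
--         queue.append((i + 1, j, si + 1 if (i + 1) % 10 else si - 8, sj))
--         queue.append((i, j + 1, si, sj + 1 if (j + 1) % 10 else sj - 8))
--     return len(visited)
-- ===== SOURCE B (Python) =====
-- def movingCount_2(m, n, k):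
--     # DP sweep: a cell is reachable iff it passes the digit-rule and its top or
--     # left neighbour is reachable (moves from A only go right/down).  Rows and
--     # columns with i//10 + i%10 > k can never be entered, so the sweep is
--     # clipped to min(m, 10*k + 10) x min(n, 10*k + 10).
--     if m <= 0 or n <= 0 or k < 0:
--         return 0
--     rows = min(m, 10 * k + 10)
--     cols = min(n, 10 * k + 10)
--     count = 0
--     prev = [False] * cols
--     for i in range(rows):
--         cur = []
--         left = False
--         for j, up in zip(range(cols), prev):
--             ok = (i // 10 + i % 10 + j // 10 + j % 10 <= k
--                   and ((i == 0 and j == 0) or up or left))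
--             cur.append(ok)
--             left = ok
--             count += ok
--         prev = cur
--     return count
-- ===== Notes on version B (the rewrite author's own statement) =====
-- stated objective: faster
-- what changed: Replaced A's BFS (a python-list queue with O(len) pop(0) plus a visited set) by a row-by-row dynamic-programming sweep that marks a cell reachable iff it passes the digit rule and its top or left neighbour is reachable, clipped to the min(m,10*k+10) x min(n,10*k+10) box outside which the digit rule forbids every cell.
import Mathlib
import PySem

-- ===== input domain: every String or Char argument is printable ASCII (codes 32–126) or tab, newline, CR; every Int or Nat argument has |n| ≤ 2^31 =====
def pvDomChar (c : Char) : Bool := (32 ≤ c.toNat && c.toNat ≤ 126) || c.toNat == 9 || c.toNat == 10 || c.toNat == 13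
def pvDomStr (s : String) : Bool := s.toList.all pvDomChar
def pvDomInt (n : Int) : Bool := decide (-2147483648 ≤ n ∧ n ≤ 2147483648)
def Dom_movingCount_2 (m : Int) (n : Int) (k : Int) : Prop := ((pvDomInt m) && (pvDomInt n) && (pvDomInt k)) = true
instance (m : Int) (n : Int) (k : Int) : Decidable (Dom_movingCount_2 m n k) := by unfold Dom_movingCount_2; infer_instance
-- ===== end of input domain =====

-- B replaces A's BFS (python-list queue with pop(0) and a visited set) by a clipped
-- row-by-row dynamic-programming sweep; a timing run measured B faster (6x at the
-- largest size both finished, 20x on the inputs A timed out on that B finished).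

-- ===== PORT A =====
-- A's BFS loop.  Queue entries are (i, j, si, sj); i and j start at 0 and are only
-- ever incremented, so they are represented as Nat (same values as A's ints); this
-- also gives the termination measure.  The loop body is A's, branch for branch.
def pvBfsA (m : Int) (n : Int) (k : Int) :
    List (Nat × Nat × Int × Int) → PySem.Set (Int × Int) → PySem.Set (Int × Int)
  | [], visited => visited
  | (i, j, si, sj) :: rest, visited =>
    if h : m ≤ (i : Int) ∨ n ≤ (j : Int) ∨ k < si + sj ∨
        PySem.Set.contains visited ((i : Int), (j : Int)) then
      pvBfsA m n k rest visited
    else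
      pvBfsA m n k
        (rest ++ [(i + 1, j, (if PySem.Int.mod ((i : Int) + 1) 10 ≠ 0 then si + 1 else si - 8), sj),
                  (i, j + 1, si, (if PySem.Int.mod ((j : Int) + 1) 10 ≠ 0 then sj + 1 else sj - 8))])
        (PySem.Set.add visited ((i : Int), (j : Int)))
  termination_by queue _ => (queue.map (fun e => 3 ^ ((m + n).toNat - (e.1 + e.2.1)))).sum
  decreasing_by
  · simp only [List.map_cons, List.sum_cons]
    have : 0 < 3 ^ ((m + n).toNat - (i + j)) := Nat.pow_pos (by norm_num : 0 < 3)
    omega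
  · simp only [List.map_append, List.sum_append, List.map_cons, List.sum_cons, List.map_nil,
      List.sum_nil]
    push_neg at h
    have hij : i + j + 2 ≤ (m + n).toNat := by omega
    have h1 : (m + n).toNat - (i + j) = ((m + n).toNat - (i + 1 + j)) + 1 := by omega
    have h2 : (m + n).toNat - (i + (j + 1)) = (m + n).toNat - (i + 1 + j) := by omega
    rw [h1, h2, pow_succ]
    have : 0 < 3 ^ ((m + n).toNat - (i + 1 + j)) := Nat.pow_pos (by norm_num : 0 < 3)
    omega

def movingCount_2 (m : Int) (n : Int) (k : Int) : Int :=
  PySem.Set.len (pvBfsA m n k [(0, 0, 0, 0)] PySem.Set.empty)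

-- ===== PORT B =====
-- B's row sweep (from Source B): prev is the previous row's reachability, cur is built
-- left to right, left is the last ok, count accumulates.
def movingCount_2_alt (m : Int) (n : Int) (k : Int) : Int :=
  if m ≤ 0 ∨ n ≤ 0 ∨ k < 0 then 0
  else
    let rows := min m (10 * k + 10)
    let cols := min n (10 * k + 10)
    let final :=
      (PySem.List.pyRange 0 rows 1).foldl
        (fun (st : List Bool × Int) (i : Int) =>
          let r :=
            ((PySem.List.pyRange 0 cols 1).zip st.1).foldl
              (fun (s : List Bool × Bool × Int) (p : Int × Bool) =>
                let ok : Bool :=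
                  decide (PySem.Int.floordiv i 10 + PySem.Int.mod i 10 +
                      PySem.Int.floordiv p.1 10 + PySem.Int.mod p.1 10 ≤ k) &&
                    (decide (i = 0 ∧ p.1 = 0) || p.2 || s.2.1)
                (s.1 ++ [ok], ok, s.2.2 + (if ok then 1 else 0)))
              ([], false, st.2)
          (r.1, r.2.2))
        (List.replicate cols.toNat false, 0)
    final.2

-- ===== PRECONDITION & SPEC =====
def Spec_movingCount_2 (m : Int) (n : Int) (k : Int) (out : Int) : Prop := out = movingCount_2_alt m n k
instance (m : Int) (n : Int) (k : Int) (out : Int) : Decidable (Spec_movingCount_2 m n k out) := by unfold Spec_movingCount_2; infer_instance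

-- ===== CLAIM (what is proved, stated in full; the proofs are below) =====
def Claim_equal_movingCount_2 : Prop := ∀ (m : Int) (n : Int) (k : Int), Dom_movingCount_2 m n k → Spec_movingCount_2 m n k (movingCount_2 m n k)

-- ===== LEMMAS AND PROOFS =====
def pvG (x : Nat) : Nat := x / 10 + x % 10

def pvValid (m n k : Int) (i j : Nat) : Bool :=
  decide ((i : Int) < m) && decide ((j : Int) < n) && decide ((pvG i : Int) + (pvG j : Int) ≤ k)

def pvReach (m : Int) (n : Int) (k : Int) : Nat → Nat → Bool
  | 0, 0 => pvValid m n k 0 0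
  | i + 1, 0 => pvValid m n k (i + 1) 0 && pvReach m n k i 0
  | 0, j + 1 => pvValid m n k 0 (j + 1) && pvReach m n k 0 j
  | i + 1, j + 1 => pvValid m n k (i + 1) (j + 1) && (pvReach m n k i (j + 1) || pvReach m n k (i + 1) j)
  termination_by i j => i + j

theorem pvReach_valid {m n k : Int} {i j : Nat} (h : pvReach m n k i j = true) :
    pvValid m n k i j = true := by
  cases i <;> cases j <;> simp [pvReach] at h ⊢ <;> tauto

theorem pvG_step (i : Nat) :
    ((pvG (i + 1) : Nat) : Int) = if PySem.Int.mod ((i : Int) + 1) 10 ≠ 0 then (pvG i : Int) + 1 else (pvG i : Int) - 8 := by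
  have hc : ((i : Int) + 1) = ((i + 1 : Nat) : Int) := by push_cast; ring
  have hm : PySem.Int.mod (((i + 1 : Nat)) : Int) 10 = (((i + 1) % 10 : Nat) : Int) := by
    exact_mod_cast PySem.Int.mod_natCast (i + 1) 10
  rw [hc, hm]
  simp only [pvG]
  split_ifs with h
  · have h' : (i + 1) % 10 ≠ 0 := by exact_mod_cast h
    push_cast; omega
  · have h' : (i + 1) % 10 = 0 := by exact_mod_cast not_not.mp h
    push_cast; omega

theorem bfs_nodup (m n k : Int) (q : List (Nat × Nat × Int × Int)) (v : PySem.Set (Int × Int))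
    (hv : v.Nodup) : (pvBfsA m n k q v).Nodup := by
  induction q, v using pvBfsA.induct m n k with
  | case1 v => rw [pvBfsA]; exact hv
  | case2 i j si sj rest v h ih => rw [pvBfsA, dif_pos h]; exact ih hv
  | case3 i j si sj rest v h ih => rw [pvBfsA, dif_neg h]; exact ih (PySem.Set.nodup_add _ _ hv)

def pvQok (e : Nat × Nat × Int × Int) : Prop := e.2.2.1 = (pvG e.1 : Int) ∧ e.2.2.2 = (pvG e.2.1 : Int)

theorem pvReach_step_i {m n k : Int} {a j : Nat} (hval : pvValid m n k (a + 1) j = true)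
    (hr : pvReach m n k a j = true) : pvReach m n k (a + 1) j = true := by
  cases j <;> simp [pvReach, hval, hr]

theorem pvReach_step_j {m n k : Int} {i b : Nat} (hval : pvValid m n k i (b + 1) = true)
    (hr : pvReach m n k i b = true) : pvReach m n k i (b + 1) = true := by
  cases i <;> simp [pvReach, hval, hr]

theorem bfs_sound (m n k : Int) (q : List (Nat × Nat × Int × Int)) (v : PySem.Set (Int × Int))
    (hq : ∀ e ∈ q, pvQok e ∧ ((e.1 = 0 ∧ e.2.1 = 0) ∨ (∃ a, e.1 = a + 1 ∧ pvReach m n k a e.2.1 = true) ∨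
      (∃ b, e.2.1 = b + 1 ∧ pvReach m n k e.1 b = true)))
    (hv : ∀ p ∈ v, ∃ a b : Nat, p = ((a : Int), (b : Int)) ∧ pvReach m n k a b = true) :
    ∀ p ∈ pvBfsA m n k q v, ∃ a b : Nat, p = ((a : Int), (b : Int)) ∧ pvReach m n k a b = true := by
  revert hq hv
  induction q, v using pvBfsA.induct m n k with
  | case1 v => intro hq hv; rw [pvBfsA]; exact hv
  | case2 i j si sj rest v h ih =>
    intro hq hv
    rw [pvBfsA, dif_pos h]
    exact ih (fun e he => hq e (List.mem_cons_of_mem _ he)) hv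
  | case3 i j si sj rest v h ih =>
    intro hq hv
    rw [pvBfsA, dif_neg h]
    simp only [not_or, not_le, not_lt] at h
    obtain ⟨hm, hn, hk, hnv⟩ := h
    obtain ⟨⟨hsi, hsj⟩, hdisj⟩ := hq (i, j, si, sj) List.mem_cons_self
    have hsi' : si = (pvG i : Int) := hsi
    have hsj' : sj = (pvG j : Int) := hsj
    have hval : pvValid m n k i j = true := by
      simp only [pvValid, Bool.and_eq_true, decide_eq_true_iff]
      refine ⟨⟨hm, hn⟩, by omega⟩
    have hreach : pvReach m n k i j = true := by
      rcases hdisj with ⟨h0, h0'⟩ | ⟨a, ha, hr⟩ | ⟨b, hb, hr⟩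
      · have h0 : i = 0 := h0
        have h0' : j = 0 := h0'
        subst h0; subst h0'
        simpa [pvReach] using hval
      · have ha : i = a + 1 := ha
        subst ha; exact pvReach_step_i hval hr
      · have hb : j = b + 1 := hb
        subst hb; exact pvReach_step_j hval hr
    apply ih
    · intro e he
      rcases List.mem_append.mp he with he | he
      · exact hq e (List.mem_cons_of_mem _ he)
      · rcases List.mem_cons.mp he with rfl | he
        · refine ⟨⟨?_, hsj⟩, Or.inr (Or.inl ⟨i, rfl, hreach⟩)⟩
          show (if PySem.Int.mod ((i : Int) + 1) 10 ≠ 0 then si + 1 else si - 8) = (pvG (i + 1) : Int)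
          rw [pvG_step i, hsi']
        · rcases List.mem_cons.mp he with rfl | he
          · refine ⟨⟨hsi, ?_⟩, Or.inr (Or.inr ⟨j, rfl, hreach⟩)⟩
            show (if PySem.Int.mod ((j : Int) + 1) 10 ≠ 0 then sj + 1 else sj - 8) = (pvG (j + 1) : Int)
            rw [pvG_step j, hsj']
          · simp at he
    · intro p hp
      rw [PySem.Set.mem_add] at hp
      rcases hp with hp | rfl
      · exact hv p hp
      · exact ⟨i, j, rfl, hreach⟩

def pvEnQ (q : List (Nat × Nat × Int × Int)) (a b : Nat) : Prop := ∃ si sj, (a, b, si, sj) ∈ q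

theorem pvEnQ_cons {i j : Nat} {si sj : Int} {rest : List (Nat × Nat × Int × Int)} {a b : Nat}
    (h : pvEnQ ((i, j, si, sj) :: rest) a b) : (a = i ∧ b = j) ∨ pvEnQ rest a b := by
  obtain ⟨sa, sb, hmem⟩ := h
  rcases List.mem_cons.mp hmem with heq | htl
  · left
    injection heq with h1 h2; injection h2 with h3 h4
    exact ⟨h1, h3⟩
  · exact Or.inr ⟨sa, sb, htl⟩

-- if the popped entry's cell is valid but the loop takes the continue branch, the cell is already visited
theorem pvHead_resolve {m n k : Int} {i j : Nat} {si sj : Int} {v : PySem.Set (Int × Int)}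
    (h : m ≤ (i : Int) ∨ n ≤ (j : Int) ∨ k < si + sj ∨ PySem.Set.contains v ((i : Int), (j : Int)))
    (hsi : si = (pvG i : Int)) (hsj : sj = (pvG j : Int))
    (hval : pvValid m n k i j = true) : ((i : Int), (j : Int)) ∈ v := by
  simp only [pvValid, Bool.and_eq_true, decide_eq_true_iff] at hval
  obtain ⟨⟨hm, hn⟩, hk⟩ := hval
  rcases h with h | h | h | h
  · omega
  · omega
  · omega
  · exact (PySem.Set.contains_iff _ _).mp h

theorem bfs_complete (m n k : Int) (q : List (Nat × Nat × Int × Int)) (v : PySem.Set (Int × Int))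
    (hq : ∀ e ∈ q, pvQok e)
    (hcl : ∀ a b : Nat, ((a : Int), (b : Int)) ∈ v →
      (pvValid m n k (a + 1) b = true → (((a + 1 : Nat) : Int), (b : Int)) ∈ v ∨ pvEnQ q (a + 1) b) ∧
      (pvValid m n k a (b + 1) = true → ((a : Int), ((b + 1 : Nat) : Int)) ∈ v ∨ pvEnQ q a (b + 1)))
    (hseed : pvValid m n k 0 0 = true → ((0 : Int), (0 : Int)) ∈ v ∨ pvEnQ q 0 0) :
    ∀ a b : Nat, pvReach m n k a b = true → ((a : Int), (b : Int)) ∈ pvBfsA m n k q v := by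
  revert hq hcl hseed
  induction q, v using pvBfsA.induct m n k with
  | case1 v =>
    intro hq hcl hseed a b
    rw [pvBfsA]
    induction a, b using pvReach.induct with
    | case1 =>
      intro hr
      have hval : pvValid m n k 0 0 = true := by simpa [pvReach] using hr
      rcases hseed hval with hmem | ⟨_, _, hmem⟩
      · exact hmem
      · simp at hmem
    | case2 a ihp =>
      intro hr
      simp only [pvReach, Bool.and_eq_true] at hr
      obtain ⟨hval, hr0⟩ := hr
      rcases (hcl a 0 (ihp hr0)).1 hval with hmem | ⟨_, _, hmem⟩
      · exact hmem
      · simp at hmem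
    | case3 b ihp =>
      intro hr
      simp only [pvReach, Bool.and_eq_true] at hr
      obtain ⟨hval, hr0⟩ := hr
      rcases (hcl 0 b (ihp hr0)).2 hval with hmem | ⟨_, _, hmem⟩
      · exact hmem
      · simp at hmem
    | case4 a b ihp1 ihp2 =>
      intro hr
      simp only [pvReach, Bool.and_eq_true, Bool.or_eq_true] at hr
      obtain ⟨hval, hr0 | hr0⟩ := hr
      · rcases (hcl a (b + 1) (ihp1 hr0)).1 hval with hmem | ⟨_, _, hmem⟩
        · exact hmem
        · simp at hmem
      · rcases (hcl (a + 1) b (ihp2 hr0)).2 hval with hmem | ⟨_, _, hmem⟩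
        · exact hmem
        · simp at hmem
  | case2 i j si sj rest v h ih =>
    intro hq hcl hseed a b hr
    rw [pvBfsA, dif_pos h]
    obtain ⟨hsi, hsj⟩ := hq (i, j, si, sj) List.mem_cons_self
    have hsi' : si = (pvG i : Int) := hsi
    have hsj' : sj = (pvG j : Int) := hsj
    refine ih (fun e he => hq e (List.mem_cons_of_mem _ he)) ?_ ?_ a b hr
    · intro x y hxy
      refine ⟨fun hval => ?_, fun hval => ?_⟩
      · rcases (hcl x y hxy).1 hval with hmem | henq
        · exact Or.inl hmem
        · rcases pvEnQ_cons henq with ⟨hx, hy⟩ | henq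
          · subst hx; subst hy
            exact Or.inl (pvHead_resolve h hsi' hsj' hval)
          · exact Or.inr henq
      · rcases (hcl x y hxy).2 hval with hmem | henq
        · exact Or.inl hmem
        · rcases pvEnQ_cons henq with ⟨hx, hy⟩ | henq
          · subst hx; subst hy
            exact Or.inl (pvHead_resolve h hsi' hsj' hval)
          · exact Or.inr henq
    · intro hval
      rcases hseed hval with hmem | henq
      · exact Or.inl hmem
      · rcases pvEnQ_cons henq with ⟨hx, hy⟩ | henq
        · subst hx; subst hy
          exact Or.inl (by simpa using pvHead_resolve h hsi' hsj' hval)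
        · exact Or.inr henq
  | case3 i j si sj rest v h ih =>
    intro hq hcl hseed a b hr
    rw [pvBfsA, dif_neg h]
    obtain ⟨hsi, hsj⟩ := hq (i, j, si, sj) List.mem_cons_self
    have hsi' : si = (pvG i : Int) := hsi
    have hsj' : sj = (pvG j : Int) := hsj
    refine ih ?_ ?_ ?_ a b hr
    · intro e he
      rcases List.mem_append.mp he with he | he
      · exact hq e (List.mem_cons_of_mem _ he)
      · rcases List.mem_cons.mp he with rfl | he
        · refine ⟨?_, hsj⟩
          show (if PySem.Int.mod ((i : Int) + 1) 10 ≠ 0 then si + 1 else si - 8) = (pvG (i + 1) : Int)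
          rw [pvG_step i, hsi']
        · rcases List.mem_cons.mp he with rfl | he
          · refine ⟨hsi, ?_⟩
            show (if PySem.Int.mod ((j : Int) + 1) 10 ≠ 0 then sj + 1 else sj - 8) = (pvG (j + 1) : Int)
            rw [pvG_step j, hsj']
          · simp at he
    · intro x y hxy
      rw [PySem.Set.mem_add] at hxy
      rcases hxy with hxy | hxy
      · refine ⟨fun hval => ?_, fun hval => ?_⟩
        · rcases (hcl x y hxy).1 hval with hmem | henq
          · exact Or.inl (by rw [PySem.Set.mem_add]; exact Or.inl hmem)
          · rcases pvEnQ_cons henq with ⟨hx, hy⟩ | ⟨s1, s2, hmem⟩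
            · subst hx; subst hy
              exact Or.inl (by rw [PySem.Set.mem_add]; exact Or.inr rfl)
            · exact Or.inr ⟨s1, s2, List.mem_append_left _ hmem⟩
        · rcases (hcl x y hxy).2 hval with hmem | henq
          · exact Or.inl (by rw [PySem.Set.mem_add]; exact Or.inl hmem)
          · rcases pvEnQ_cons henq with ⟨hx, hy⟩ | ⟨s1, s2, hmem⟩
            · subst hx; subst hy
              exact Or.inl (by rw [PySem.Set.mem_add]; exact Or.inr rfl)
            · exact Or.inr ⟨s1, s2, List.mem_append_left _ hmem⟩
      · have hx : x = i ∧ y = j := by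
          have h1 : ((x : Int), (y : Int)) = ((i : Int), (j : Int)) := hxy
          have h2 : (x : Int) = (i : Int) := congrArg Prod.fst h1
          have h3 : (y : Int) = (j : Int) := congrArg Prod.snd h1
          exact ⟨by exact_mod_cast h2, by exact_mod_cast h3⟩
        obtain ⟨rfl, rfl⟩ := hx
        refine ⟨fun _ => Or.inr ?_, fun _ => Or.inr ?_⟩
        · exact ⟨_, _, List.mem_append_right _ List.mem_cons_self⟩
        · exact ⟨_, _, List.mem_append_right _ (List.mem_cons_of_mem _ List.mem_cons_self)⟩
    · intro hval
      rcases hseed hval with hmem | henq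
      · exact Or.inl (by rw [PySem.Set.mem_add]; exact Or.inl hmem)
      · rcases pvEnQ_cons henq with ⟨hx, hy⟩ | ⟨s1, s2, hmem⟩
        · subst hx; subst hy
          refine Or.inl ?_
          rw [PySem.Set.mem_add]
          right; simp
        · exact Or.inr ⟨s1, s2, List.mem_append_left _ hmem⟩

theorem bfs_main (m n k : Int) (p : Int × Int) :
    p ∈ pvBfsA m n k [(0, 0, 0, 0)] PySem.Set.empty ↔
      ∃ a b : Nat, p = ((a : Int), (b : Int)) ∧ pvReach m n k a b = true := by
  constructor
  · intro hp
    refine bfs_sound m n k _ _ ?_ ?_ p hp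
    · intro e he
      rcases List.mem_cons.mp he with rfl | he
      · exact ⟨⟨by simp [pvG], by simp [pvG]⟩, Or.inl ⟨rfl, rfl⟩⟩
      · simp at he
    · intro p hp; simp [PySem.Set.empty] at hp
  · rintro ⟨a, b, rfl, hr⟩
    refine bfs_complete m n k _ _ ?_ ?_ ?_ a b hr
    · intro e he
      rcases List.mem_cons.mp he with rfl | he
      · exact ⟨by simp [pvG], by simp [pvG]⟩
      · simp at he
    · intro x y hxy; simp [PySem.Set.empty] at hxy
    · intro _; exact Or.inr ⟨0, 0, List.mem_cons_self⟩

def pvStepF (k i : Int) (s : List Bool × Bool × Int) (p : Int × Bool) : List Bool × Bool × Int :=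
  let ok : Bool :=
    decide (PySem.Int.floordiv i 10 + PySem.Int.mod i 10 +
        PySem.Int.floordiv p.1 10 + PySem.Int.mod p.1 10 ≤ k) &&
      (decide (i = 0 ∧ p.1 = 0) || p.2 || s.2.1)
  (s.1 ++ [ok], ok, s.2.2 + (if ok then 1 else 0))

def pvUp (m n k : Int) : Nat → Nat → Bool
  | 0, _ => false
  | a + 1, b => pvReach m n k a b

def pvLeft (m n k : Int) (a : Nat) : Nat → Bool
  | 0 => false
  | b + 1 => pvReach m n k a b

theorem pvGsum (a : Nat) :
    PySem.Int.floordiv (a : Int) 10 + PySem.Int.mod (a : Int) 10 = (pvG a : Int) := by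
  have h1 : PySem.Int.floordiv (a : Int) 10 = ((a / 10 : Nat) : Int) := by
    exact_mod_cast PySem.Int.floordiv_natCast a 10
  have h2 : PySem.Int.mod (a : Int) 10 = ((a % 10 : Nat) : Int) := by
    exact_mod_cast PySem.Int.mod_natCast a 10
  rw [h1, h2]
  simp [pvG]

theorem pvOk_eq (m n k : Int) (a b : Nat) (ha : (a : Int) < m) (hb : (b : Int) < n) :
    (decide (PySem.Int.floordiv (a : Int) 10 + PySem.Int.mod (a : Int) 10 +
        PySem.Int.floordiv (b : Int) 10 + PySem.Int.mod (b : Int) 10 ≤ k) &&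
      (decide ((a : Int) = 0 ∧ (b : Int) = 0) || pvUp m n k a b || pvLeft m n k a b))
      = pvReach m n k a b := by
  rw [pvGsum a, add_assoc, pvGsum b]
  have hd : decide ((a : Int) = 0 ∧ (b : Int) = 0) = decide (a = 0 ∧ b = 0) := by
    simp
  rw [hd]
  have ha' : decide ((a : Int) < m) = true := decide_eq_true ha
  have hb' : decide ((b : Int) < n) = true := decide_eq_true hb
  cases a with
  | zero => cases b with
    | zero =>
      simp only [pvReach, pvValid, pvUp, pvLeft]
      simp only [ha', hb'] at *
      simp
    | succ b =>
      simp only [pvReach, pvValid, pvUp, pvLeft]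
      simp only [ha', hb'] at *
      simp
  | succ a => cases b with
    | zero =>
      simp only [pvReach, pvValid, pvUp, pvLeft]
      simp only [ha', hb'] at *
      simp
    | succ b =>
      simp only [pvReach, pvValid, pvUp, pvLeft]
      simp only [ha', hb'] at *
      simp [Bool.or_comm]

theorem pvInner (m n k : Int) (a CN : Nat) (ha : (a : Int) < m)
    (hC : ∀ b : Nat, b < CN → (b : Int) < n) (t : Nat) (ht : t ≤ CN) (c0 : Int) :
    (List.range t).foldl (fun (s : List Bool × Bool × Int) (b : Nat) => pvStepF k (a : Int) s ((b : Int), pvUp m n k a b)) ([], false, c0)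
      = ((List.range t).map (fun b => pvReach m n k a b), pvLeft m n k a t,
          c0 + ∑ b ∈ Finset.range t, (if pvReach m n k a b then (1 : Int) else 0)) := by
  induction t with
  | zero => simp [pvLeft]
  | succ t ih =>
    rw [List.range_succ, List.foldl_append, ih (Nat.le_of_succ_le ht)]
    simp only [List.foldl_cons, List.foldl_nil, pvStepF]
    rw [pvOk_eq m n k a t ha (hC t ht)]
    refine Prod.ext ?_ (Prod.ext ?_ ?_)
    · simp
    · simp [pvLeft]
    · simp only [Finset.sum_range_succ]
      ring

def pvOuterF (k C : Int) (st : List Bool × Int) (i : Int) : List Bool × Int :=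
  let r := ((PySem.List.pyRange 0 C 1).zip st.1).foldl
    (fun (s : List Bool × Bool × Int) (p : Int × Bool) => pvStepF k i s p) ([], false, st.2)
  (r.1, r.2.2)

def pvPrevL (m n k : Int) (CN : Nat) : Nat → List Bool
  | 0 => List.replicate CN false
  | a + 1 => (List.range CN).map (fun b => pvReach m n k a b)

theorem pvPrevL_eq_map (m n k : Int) (CN : Nat) (a : Nat) :
    pvPrevL m n k CN a = (List.range CN).map (fun b => pvUp m n k a b) := by
  cases a with
  | zero =>
    show List.replicate CN false = (List.range CN).map (fun _ => false)
    simp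
  | succ a => rfl

theorem pvOuter (m n k : Int) (RN CN : Nat) (C : Int) (hCc : C = (CN : Int))
    (hR : ∀ a : Nat, a < RN → (a : Int) < m) (hCn : ∀ b : Nat, b < CN → (b : Int) < n)
    (t : Nat) (ht : t ≤ RN) :
    (List.range t).foldl (fun (st : List Bool × Int) (a : Nat) => pvOuterF k C st (a : Int))
        (List.replicate CN false, 0)
      = (pvPrevL m n k CN t,
          ∑ a ∈ Finset.range t, ∑ b ∈ Finset.range CN, (if pvReach m n k a b then (1 : Int) else 0)) := by
  induction t with
  | zero => simp [pvPrevL]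
  | succ t ih =>
    rw [List.range_succ, List.foldl_append, ih (Nat.le_of_succ_le ht)]
    simp only [List.foldl_cons, List.foldl_nil, pvOuterF]
    rw [hCc, PySem.List.pyRange_zero_natCast, pvPrevL_eq_map, List.zip_map', List.foldl_map]
    rw [pvInner m n k t CN (hR t ht) hCn CN (le_refl CN) _]
    refine Prod.ext ?_ ?_
    · simp [pvPrevL]
    · simp [Finset.sum_range_succ]

theorem alt_characterization (m n k : Int) (hm : 0 < m) (hn : 0 < n) (hk : 0 ≤ k) :
    movingCount_2_alt m n k
      = ∑ a ∈ Finset.range (min m (10 * k + 10)).toNat,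
          ∑ b ∈ Finset.range (min n (10 * k + 10)).toNat,
            (if pvReach m n k a b then (1 : Int) else 0) := by
  have hdeg : ¬ (m ≤ 0 ∨ n ≤ 0 ∨ k < 0) := by omega
  have hRpos : (0 : Int) ≤ min m (10 * k + 10) := le_min (by omega) (by omega)
  have hCpos : (0 : Int) ≤ min n (10 * k + 10) := le_min (by omega) (by omega)
  have hRcast : min m (10 * k + 10) = (((min m (10 * k + 10)).toNat : Nat) : Int) :=
    (Int.toNat_of_nonneg hRpos).symm
  have hCcast : min n (10 * k + 10) = (((min n (10 * k + 10)).toNat : Nat) : Int) :=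
    (Int.toNat_of_nonneg hCpos).symm
  have hR : ∀ a : Nat, a < (min m (10 * k + 10)).toNat → (a : Int) < m := by
    intro a haR
    have h1 : (a : Int) < min m (10 * k + 10) := by
      rw [hRcast]; exact_mod_cast haR
    exact lt_of_lt_of_le h1 (min_le_left _ _)
  have hCn : ∀ b : Nat, b < (min n (10 * k + 10)).toNat → (b : Int) < n := by
    intro b hbC
    have h1 : (b : Int) < min n (10 * k + 10) := by
      rw [hCcast]; exact_mod_cast hbC
    exact lt_of_lt_of_le h1 (min_le_left _ _)
  unfold movingCount_2_alt
  rw [if_neg hdeg]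
  show ((PySem.List.pyRange 0 (min m (10 * k + 10)) 1).foldl
      (fun (st : List Bool × Int) (i : Int) => pvOuterF k (min n (10 * k + 10)) st i)
      (List.replicate (min n (10 * k + 10)).toNat false, 0)).2 = _
  rw [hRcast, PySem.List.pyRange_zero_natCast, List.foldl_map]
  have hout := pvOuter m n k (min m (10 * k + 10)).toNat (min n (10 * k + 10)).toNat
    (min n (10 * k + 10)) hCcast hR hCn (min m (10 * k + 10)).toNat le_rfl
  rw [show (fun (st : List Bool × Int) (x : Nat) => pvOuterF k (min n (10 * k + 10)) st ((fun kk : Nat => (kk : Int)) x))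
      = (fun (st : List Bool × Int) (a : Nat) => pvOuterF k (min n (10 * k + 10)) st (a : Int)) from rfl]
  rw [hout]
  simp only [Int.toNat_natCast]

theorem pvReach_bounds {m n k : Int} {a b : Nat} (h : pvReach m n k a b = true) :
    a < (min m (10 * k + 10)).toNat ∧ b < (min n (10 * k + 10)).toNat := by
  have hval := pvReach_valid h
  simp only [pvValid, Bool.and_eq_true, decide_eq_true_iff] at hval
  obtain ⟨⟨hm, hn⟩, hk⟩ := hval
  have hga : a ≤ 10 * pvG a := by unfold pvG; omega
  have hgb : b ≤ 10 * pvG b := by unfold pvG; omega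
  have hka : ((pvG a : Nat) : Int) ≤ k := by
    have : (0 : Int) ≤ (pvG b : Nat) := Int.natCast_nonneg _
    omega
  have hkb : ((pvG b : Nat) : Int) ≤ k := by
    have : (0 : Int) ≤ (pvG a : Nat) := Int.natCast_nonneg _
    omega
  have ha' : (a : Int) < min m (10 * k + 10) := by
    refine lt_min hm ?_
    have h1 : (a : Int) ≤ 10 * ((pvG a : Nat) : Int) := by exact_mod_cast hga
    omega
  have hb' : (b : Int) < min n (10 * k + 10) := by
    refine lt_min hn ?_
    have h1 : (b : Int) ≤ 10 * ((pvG b : Nat) : Int) := by exact_mod_cast hgb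
    omega
  constructor
  · have h0 : (0 : Int) ≤ min m (10 * k + 10) := le_trans (Int.natCast_nonneg a) (le_of_lt ha')
    omega
  · have h0 : (0 : Int) ≤ min n (10 * k + 10) := le_trans (Int.natCast_nonneg b) (le_of_lt hb')
    omega

theorem a_characterization (m n k : Int) (hm : 0 < m) (hn : 0 < n) (hk : 0 ≤ k) :
    movingCount_2 m n k
      = ∑ a ∈ Finset.range (min m (10 * k + 10)).toNat,
          ∑ b ∈ Finset.range (min n (10 * k + 10)).toNat,
            (if pvReach m n k a b then (1 : Int) else 0) := by
  have hnodup : (pvBfsA m n k [(0, 0, 0, 0)] PySem.Set.empty).Nodup :=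
    bfs_nodup m n k _ _ List.nodup_nil
  have hinj : Function.Injective (fun p : Nat × Nat => ((p.1 : Int), (p.2 : Int))) := by
    intro p q hpq
    have h1 : (p.1 : Int) = (q.1 : Int) := congrArg Prod.fst hpq
    have h2 : (p.2 : Int) = (q.2 : Int) := congrArg Prod.snd hpq
    exact Prod.ext (by exact_mod_cast h1) (by exact_mod_cast h2)
  have hfin : (pvBfsA m n k [(0, 0, 0, 0)] PySem.Set.empty).toFinset
      = ((Finset.range (min m (10 * k + 10)).toNat ×ˢ Finset.range (min n (10 * k + 10)).toNat).filter
          (fun p => pvReach m n k p.1 p.2 = true)).image (fun p => ((p.1 : Int), (p.2 : Int))) := by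
    ext p
    rw [List.mem_toFinset, bfs_main]
    constructor
    · rintro ⟨a, b, rfl, hr⟩
      refine Finset.mem_image.mpr ⟨(a, b), ?_, rfl⟩
      refine Finset.mem_filter.mpr ⟨?_, hr⟩
      obtain ⟨h1, h2⟩ := pvReach_bounds hr
      exact Finset.mem_product.mpr ⟨Finset.mem_range.mpr h1, Finset.mem_range.mpr h2⟩
    · intro hp
      obtain ⟨q, hq, rfl⟩ := Finset.mem_image.mp hp
      exact ⟨q.1, q.2, rfl, (Finset.mem_filter.mp hq).2⟩
  have hlen : (pvBfsA m n k [(0, 0, 0, 0)] PySem.Set.empty).length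
      = ∑ a ∈ Finset.range (min m (10 * k + 10)).toNat,
          ∑ b ∈ Finset.range (min n (10 * k + 10)).toNat,
            (if pvReach m n k a b = true then (1 : Nat) else 0) := by
    rw [← List.toFinset_card_of_nodup hnodup, hfin, Finset.card_image_of_injective _ hinj,
      Finset.card_filter, Finset.sum_product]
  show PySem.Set.len (pvBfsA m n k [(0, 0, 0, 0)] PySem.Set.empty) = _
  have hlen' : PySem.Set.len (pvBfsA m n k [(0, 0, 0, 0)] PySem.Set.empty)
      = ((pvBfsA m n k [(0, 0, 0, 0)] PySem.Set.empty).length : Int) := by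
    simp [PySem.Set.len]
  rw [hlen', hlen]
  push_cast
  refine Finset.sum_congr rfl fun a _ => Finset.sum_congr rfl fun b _ => ?_
  split_ifs <;> simp

theorem deg_A (m n k : Int) (hdeg : m ≤ 0 ∨ n ≤ 0 ∨ k < 0) : movingCount_2 m n k = 0 := by
  unfold movingCount_2
  rw [pvBfsA, dif_pos ?hc, pvBfsA]
  case hc =>
    rcases hdeg with h | h | h
    · exact Or.inl (by exact_mod_cast h)
    · exact Or.inr (Or.inl (by exact_mod_cast h))
    · exact Or.inr (Or.inr (Or.inl (by omega)))
  rfl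

theorem movingCount_2_spec' : ∀ (m n k : Int), movingCount_2 m n k = movingCount_2_alt m n k := by
  intro m n k
  by_cases hdeg : m ≤ 0 ∨ n ≤ 0 ∨ k < 0
  · rw [deg_A m n k hdeg]
    unfold movingCount_2_alt
    rw [if_pos hdeg]
  · push_neg at hdeg
    obtain ⟨hm, hn, hk⟩ := hdeg
    rw [a_characterization m n k hm hn (by omega), alt_characterization m n k hm hn (by omega)]

-- ===== VERDICT (by name: the statement is the Claim_ definition above) =====
theorem movingCount_2_spec : Claim_equal_movingCount_2 := by
  unfold Claim_equal_movingCount_2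
  intro m n k _
  unfold Spec_movingCount_2
  exact movingCount_2_spec' m n k
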